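-- pv_equiv track=rewrite | github.com/AndrewSpangler/KungFu | kungfu/declaration.py | get_sigs
-- ===== SOURCE A (Python) =====
-- import itertools
--
-- def get_sigs(arity: int, types: list, res_type_override: str = None):
--     sigs = []
--     for combo in itertools.product(types, repeat=arity):
--         if res_type_override:
--             res = res_type_override
--         else:
--             res = "float" if "float" in combo else combo[0]
--         sigs.append((list(combo), res))
--     return sigs
-- ===== SOURCE B (Python) =====
-- def get_sigs(arity: int, types: list, res_type_override: str = None):
--     m = len(types)
--     sigs = []
--     for k in range(m ** arity):
--         combo = []
--         for _ in range(arity):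
--             k, d = divmod(k, m)
--             combo.append(types[d])
--         combo.reverse()
--         if res_type_override:
--             res = res_type_override
--         else:
--             res = "float" if "float" in combo else combo[0]
--         sigs.append((combo, res))
--     return sigs
-- ===== Notes on version B (the rewrite author's own statement) =====
-- stated objective: alternative
-- what changed: Replaces itertools.product with mixed-radix index decoding: combo #k is computed by repeated divmod of k in base len(types), so no product machinery or combination accumulator is kept; Pre_ excludes negative arity and arity=0 with a falsy override, on which A raises (ValueError / IndexError).
import Mathlib
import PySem

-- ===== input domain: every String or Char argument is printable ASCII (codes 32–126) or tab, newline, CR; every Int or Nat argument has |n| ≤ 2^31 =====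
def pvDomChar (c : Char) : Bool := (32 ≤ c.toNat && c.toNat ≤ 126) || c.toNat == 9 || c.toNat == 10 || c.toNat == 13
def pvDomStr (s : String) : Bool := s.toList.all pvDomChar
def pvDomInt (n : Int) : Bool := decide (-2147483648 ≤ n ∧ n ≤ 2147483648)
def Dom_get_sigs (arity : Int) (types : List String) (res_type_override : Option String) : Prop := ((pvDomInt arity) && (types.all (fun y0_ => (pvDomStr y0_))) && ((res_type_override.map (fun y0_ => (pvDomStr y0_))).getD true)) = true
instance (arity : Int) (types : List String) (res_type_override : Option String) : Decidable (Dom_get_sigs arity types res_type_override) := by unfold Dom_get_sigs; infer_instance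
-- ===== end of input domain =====

-- B replaces itertools.product with mixed-radix index decoding: combo #k is the base-|types|
-- digit expansion of k; a different algorithm of the same cost ('alternative').

-- ===== PORT A =====
-- itertools.product(types, repeat=arity): result starts as [[]] and for each of the
-- arity pools each partial combo is extended at the END by every element of types.
def pvProductRepeat (types : List String) (n : Nat) : List (List String) :=
  (List.range n).foldl (fun acc _ => acc.flatMap (fun c => types.map (fun t => c ++ [t]))) [[]]

-- res = res_type_override if truthy else ("float" if "float" in combo else combo[0]);
-- combo[0] on the empty combo raises IndexError in Python (excluded by Pre_), headD "" here.
def pvResA (res_type_override : Option String) (combo : List String) : String :=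
  if res_type_override.getD "" ≠ "" then res_type_override.getD ""
  else if "float" ∈ combo then "float" else combo.headD ""

def get_sigs (arity : Int) (types : List String) (res_type_override : Option String) : List (List String × String) :=
  pvProductRepeat types arity.toNat |>.foldl
    (fun sigs combo => sigs ++ [(combo, pvResA res_type_override combo)]) []

-- ===== PORT B =====
-- inner loop of Source B: run `arity` times from (k, []), each step taking divmod(k, m),
-- appending types[d], then reversing the digit list at the end.
def pvComboB (types : List String) (arity : Nat) (k : Nat) : List String :=
  (((List.range arity).foldl
      (fun (st : Nat × List String) _ =>
        (st.1 / types.length, st.2 ++ [types.getD (st.1 % types.length) ""]))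
      (k, [])).2).reverse

def pvResB (res_type_override : Option String) (combo : List String) : String :=
  match res_type_override with
  | some s => if s = "" then (if "float" ∈ combo then "float" else combo.headD "") else s
  | none => if "float" ∈ combo then "float" else combo.headD ""

def get_sigs_alt (arity : Int) (types : List String) (res_type_override : Option String) : List (List String × String) :=
  (List.range (types.length ^ arity.toNat)).map
    (fun k =>
      let combo := pvComboB types arity.toNat k
      (combo, pvResB res_type_override combo))

-- ===== PRECONDITION & SPEC =====
-- Pre_ excludes exactly the inputs where A raises: arity < 0 (ValueError from product),
-- and arity = 0 with a falsy override (combo[0] on the empty combo raises IndexError).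
def Pre_get_sigs (arity : Int) (types : List String) (res_type_override : Option String) : Prop :=
  0 ≤ arity ∧ (arity = 0 → res_type_override.getD "" ≠ "")
instance (arity : Int) (types : List String) (res_type_override : Option String) : Decidable (Pre_get_sigs arity types res_type_override) := by unfold Pre_get_sigs; infer_instance

def pvWitness_get_sigs : Int × List String × Option String := (2, ["int", "float"], none)

def Spec_get_sigs (arity : Int) (types : List String) (res_type_override : Option String) (out : List (List String × String)) : Prop := out = get_sigs_alt arity types res_type_override
instance (arity : Int) (types : List String) (res_type_override : Option String) (out : List (List String × String)) : Decidable (Spec_get_sigs arity types res_type_override out) := by unfold Spec_get_sigs; infer_instance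

-- ===== CLAIM (what is proved, stated in full; the proofs are below) =====
def Claim_equal_get_sigs : Prop := ∀ (arity : Int) (types : List String) (res_type_override : Option String), Dom_get_sigs arity types res_type_override → Pre_get_sigs arity types res_type_override → Spec_get_sigs arity types res_type_override (get_sigs arity types res_type_override)

-- ===== LEMMAS AND PROOFS =====

-- the digit list of k in base (types.length), least significant first, n digits
def pvRawDigits (types : List String) : Nat → Nat → List String
  | 0, _ => []
  | n + 1, k =>
      types.getD (k % types.length) "" :: pvRawDigits types n (k / types.length)

theorem pvComboAux (types : List String) (n : Nat) :
    ∀ (k : Nat) (acc : List String),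
      ((List.range n).foldl
        (fun (st : Nat × List String) _ =>
          (st.1 / types.length, st.2 ++ [types.getD (st.1 % types.length) ""]))
        (k, acc)).2 = acc ++ pvRawDigits types n k := by
  induction n with
  | zero => intro k acc; simp [pvRawDigits]
  | succ n ih =>
    intro k acc
    rw [List.range_succ_eq_map, List.foldl_cons, List.foldl_map]
    simpa [pvRawDigits] using ih (k / types.length) (acc ++ [types.getD (k % types.length) ""])

theorem pvComboB_eq (types : List String) (n k : Nat) :
    pvComboB types n k = (pvRawDigits types n k).reverse := by
  unfold pvComboB; rw [pvComboAux]; simp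

theorem pvCombo_succ (types : List String) (n k : Nat) :
    pvComboB types (n + 1) k =
      pvComboB types n (k / types.length) ++ [types.getD (k % types.length) ""] := by
  simp [pvComboB_eq, pvRawDigits]

theorem pvRangeMul_flatMap {α : Type} (f : Nat → α) (a b : Nat) :
    (List.range (a * b)).map f =
      (List.range a).flatMap (fun q => (List.range b).map (fun r => f (q * b + r))) := by
  induction a with
  | zero => simp
  | succ a ih =>
    rw [Nat.succ_mul, List.range_add, List.map_append, List.range_succ,
      List.flatMap_append, ih]
    simp [Function.comp_def]

theorem pvMap_eq_range {α : Type} (l : List String) (f : String → α) :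
    l.map f = (List.range l.length).map (fun i => f (l.getD i "")) := by
  induction l with
  | nil => rfl
  | cons x xs ih =>
    rw [List.map_cons, List.length_cons, List.range_succ_eq_map, List.map_cons,
      List.map_map]
    simp [ih]

theorem pvProductRepeat_succ (types : List String) (n : Nat) :
    pvProductRepeat types (n + 1) =
      (pvProductRepeat types n).flatMap (fun c => types.map (fun t => c ++ [t])) := by
  unfold pvProductRepeat
  rw [List.range_succ, List.foldl_append]
  rfl

theorem pvProduct_eq_decode (types : List String) (n : Nat) :
    pvProductRepeat types n =
      (List.range (types.length ^ n)).map (pvComboB types n) := by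
  induction n with
  | zero => simp [pvProductRepeat, pvComboB]
  | succ n ih =>
    rw [pvProductRepeat_succ, ih, pow_succ, pvRangeMul_flatMap, List.flatMap_map]
    refine List.flatMap_congr ?_
    intro q _
    rw [pvMap_eq_range types (fun t => pvComboB types n q ++ [t])]
    refine List.map_congr_left ?_
    intro r hr
    rw [List.mem_range] at hr
    have hm : 0 < types.length := lt_of_le_of_lt (Nat.zero_le r) hr
    have h2 : (q * types.length + r) / types.length = q := by
      rw [mul_comm, Nat.mul_add_div hm, Nat.div_eq_of_lt hr, add_zero]
    have h1 : (q * types.length + r) % types.length = r := by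
      rw [mul_comm, Nat.mul_add_mod, Nat.mod_eq_of_lt hr]
    rw [pvCombo_succ, h1, h2]

theorem pvFoldl_push_eq_map {α β : Type} (f : α → β) (l : List α) (acc : List β) :
    l.foldl (fun s c => s ++ [f c]) acc = acc ++ l.map f := by
  induction l generalizing acc with
  | nil => simp
  | cons x xs ih => simp [List.foldl_cons, ih]

theorem pvResA_eq_resB (ro : Option String) (c : List String) :
    pvResA ro c = pvResB ro c := by
  cases ro with
  | none => simp [pvResA, pvResB]
  | some s =>
    simp only [pvResA, pvResB, Option.getD_some]
    by_cases h : s = "" <;> simp [h]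

-- ===== VERDICT (by name: the statement is the Claim_ definition above) =====
theorem get_sigs_spec : Claim_equal_get_sigs := by
  intro arity types ro _ _
  unfold Spec_get_sigs get_sigs get_sigs_alt
  rw [pvProduct_eq_decode, pvFoldl_push_eq_map]
  simp [pvResA_eq_resB]
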